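-- pv_equiv track=rewrite | github.com/cedrik-fuoco-adsk/OpenRV | cmake/scripts/apply_sed.py | _bre_to_python_replacement
-- ===== SOURCE A (Python) =====
-- def _bre_to_python_replacement(bre_replacement):
--     """Convert a sed BRE replacement string to Python regex replacement.
--
--     In sed replacements:
--         & refers to the entire match
--         \\1-\\9 are backreferences (same as Python)
--         \\n is a newline
--     """
--     result = []
--     i = 0
--     while i < len(bre_replacement):
--         if bre_replacement[i] == "\\" and i + 1 < len(bre_replacement):
--             next_char = bre_replacement[i + 1]
--             if next_char == "&":
--                 # Escaped ampersand — literal &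
--                 result.append("&")
--             elif next_char == "\\":
--                 result.append("\\\\")
--             elif next_char == "n":
--                 result.append("\n")
--             else:
--                 result.append("\\")
--                 result.append(next_char)
--             i += 2
--         elif bre_replacement[i] == "&":
--             result.append("\\g<0>")
--             i += 1
--         else:
--             result.append(bre_replacement[i])
--             i += 1
--     return "".join(result)
-- ===== SOURCE B (Python) =====
-- import re
--
-- _TOKEN = re.compile(r'\\(.)|&')
--
--
-- def _repl(m):
--     c = m.group(1)
--     if c is None:
--         return '\\g<0>'  # bare & -> whole-match reference
--     if c == '&':
--         return '&'
--     if c == '\\':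
--         return '\\\\'
--     if c == 'n':
--         return '\n'
--     return '\\' + c
--
--
-- def _bre_to_python_replacement(bre_replacement):
--     return _TOKEN.sub(_repl, bre_replacement)
-- ===== Notes on version B (the rewrite author's own statement) =====
-- stated objective: idiomatic
-- what changed: Replaced the manual while-loop with index arithmetic by a single re.sub over the token pattern r'\\(.)|&' with a replacement callback that maps each escape token.
import Mathlib
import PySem

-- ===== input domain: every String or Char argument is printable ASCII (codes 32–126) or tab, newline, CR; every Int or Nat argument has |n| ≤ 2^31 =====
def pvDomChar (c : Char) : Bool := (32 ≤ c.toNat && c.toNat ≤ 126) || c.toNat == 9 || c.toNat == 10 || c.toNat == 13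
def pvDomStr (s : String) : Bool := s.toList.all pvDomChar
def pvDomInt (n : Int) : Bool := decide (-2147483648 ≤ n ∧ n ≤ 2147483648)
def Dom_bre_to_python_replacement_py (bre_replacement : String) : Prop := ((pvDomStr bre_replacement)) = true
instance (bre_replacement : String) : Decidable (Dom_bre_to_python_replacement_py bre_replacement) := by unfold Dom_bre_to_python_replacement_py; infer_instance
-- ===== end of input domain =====

-- B replaces A's while-loop/index arithmetic by one regex-driven pass (re.sub with a callback); same output, same cost.

-- ===== PORT A =====
-- A's while-loop: each step consumes one or two characters and appends the pieces; join = concatenation.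
def pvGoA : List Char → List Char
  | [] => []
  | '\\' :: c :: rest =>
      (if c = '&' then ['&']
       else if c = '\\' then ['\\', '\\']
       else if c = 'n' then ['\n']
       else ['\\', c]) ++ pvGoA rest
  | c :: rest =>
      (if c = '&' then ['\\', 'g', '<', '0', '>'] else [c]) ++ pvGoA rest

def bre_to_python_replacement_py (bre_replacement : String) : String :=
  String.mk (pvGoA bre_replacement.toList)

-- ===== PORT B =====
-- Source B tokens of the regex r'\\(.)|&' ('.' does not match '\n')
inductive PvTok
  | esc : Char → PvTok
  | amp : PvTok

-- leftmost match of the regex: (text before the match, the token, text after)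
def pvFindTok : List Char → Option (List Char × PvTok × List Char)
  | [] => none
  | '\\' :: c :: rest =>
      if c = '\n' then (pvFindTok (c :: rest)).map (fun (p, t, r) => ('\\' :: p, t, r))
      else some ([], .esc c, rest)
  | '&' :: rest => some ([], .amp, rest)
  | c :: rest => (pvFindTok rest).map (fun (p, t, r) => (c :: p, t, r))

-- Source B's _repl callback
def pvRepl : PvTok → List Char
  | .esc '&' => ['&']
  | .esc '\\' => ['\\', '\\']
  | .esc 'n' => ['\n']
  | .esc c => ['\\', c]
  | .amp => ['\\', 'g', '<', '0', '>']

theorem pvFindTok_rest_lt : ∀ (l p : List Char) (t : PvTok) (r : List Char),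
    pvFindTok l = some (p, t, r) → r.length < l.length := by
  intro l
  fun_induction pvFindTok l <;> intro p t r h
  · simp at h
  · rename_i ih
    simp only [Option.map_eq_some_iff] at h
    obtain ⟨⟨p2, t2, r2⟩, hp2, h2⟩ := h
    simp only [Prod.mk.injEq] at h2
    obtain ⟨rfl, rfl, rfl⟩ := h2
    have := ih p2 t2 r2 hp2
    simp at this ⊢
    omega
  · simp_all
  · simp_all
  · rename_i ih
    simp only [Option.map_eq_some_iff] at h
    obtain ⟨⟨p2, t2, r2⟩, hp2, h2⟩ := h
    simp only [Prod.mk.injEq] at h2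
    obtain ⟨rfl, rfl, rfl⟩ := h2
    have := ih p2 t2 r2 hp2
    simp at this ⊢
    omega

-- re.sub driver: replace each leftmost token via the callback, keep the rest
def pvSubB (l : List Char) : List Char :=
  match h : pvFindTok l with
  | none => l
  | some (p, t, r) => p ++ pvRepl t ++ pvSubB r
termination_by l.length
decreasing_by exact pvFindTok_rest_lt l p t r h

def bre_to_python_replacement_py_alt (bre_replacement : String) : String :=
  String.mk (pvSubB bre_replacement.toList)

-- ===== PRECONDITION & SPEC =====
def Spec_bre_to_python_replacement_py (bre_replacement : String) (out : String) : Prop := out = bre_to_python_replacement_py_alt bre_replacement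
instance (bre_replacement : String) (out : String) : Decidable (Spec_bre_to_python_replacement_py bre_replacement out) := by unfold Spec_bre_to_python_replacement_py; infer_instance

-- ===== CLAIM (what is proved, stated in full; the proofs are below) =====
def Claim_equal_bre_to_python_replacement_py : Prop := ∀ (bre_replacement : String), Dom_bre_to_python_replacement_py bre_replacement → Spec_bre_to_python_replacement_py bre_replacement (bre_to_python_replacement_py bre_replacement)


-- ===== LEMMAS AND PROOFS =====

-- equation lemmas for the token finder
theorem ft_nil : pvFindTok [] = none := by simp [pvFindTok]

theorem ft_esc {c : Char} (rest : List Char) (h : c ≠ '\n') :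
    pvFindTok ('\\' :: c :: rest) = some ([], .esc c, rest) := by
  simp [pvFindTok, h]

theorem ft_bs_nl (rest : List Char) :
    pvFindTok ('\\' :: '\n' :: rest)
      = (pvFindTok ('\n' :: rest)).map (fun (p, t, r) => ('\\' :: p, t, r)) := by
  rw [pvFindTok]; simp

theorem ft_amp (rest : List Char) : pvFindTok ('&' :: rest) = some ([], .amp, rest) := by
  simp [pvFindTok]

theorem ft_bs_nil : pvFindTok ['\\'] = none := by simp [pvFindTok]

theorem ft_skip {c : Char} (rest : List Char) (h1 : c ≠ '\\') (h2 : c ≠ '&') :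
    pvFindTok (c :: rest) = (pvFindTok rest).map (fun (p, t, r) => (c :: p, t, r)) := by
  cases rest with
  | nil => simp [pvFindTok, h1, h2]
  | cons d r => simp [pvFindTok, h1, h2]

-- unfolding lemmas for the re.sub driver
theorem subB_none {l : List Char} (h : pvFindTok l = none) : pvSubB l = l := by
  rw [pvSubB]; split <;> simp_all

theorem subB_some {l p : List Char} {t : PvTok} {r : List Char}
    (h : pvFindTok l = some (p, t, r)) : pvSubB l = p ++ pvRepl t ++ pvSubB r := by
  rw [pvSubB]; split <;> simp_all

-- a head character that starts no token moves into the prefix of the next match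
theorem subB_prepend (c : Char) (l : List Char)
    (hf : pvFindTok (c :: l) = (pvFindTok l).map (fun (p, t, r) => (c :: p, t, r))) :
    pvSubB (c :: l) = c :: pvSubB l := by
  cases hl : pvFindTok l with
  | none => rw [subB_none (by rw [hf, hl]; rfl), subB_none hl]
  | some x =>
    obtain ⟨p, t, r⟩ := x
    rw [subB_some (show pvFindTok (c :: l) = some (c :: p, t, r) by rw [hf, hl]; rfl),
        subB_some hl]
    simp

-- equation lemmas for A's loop
theorem goA_bs_cons (c : Char) (rest : List Char) :
    pvGoA ('\\' :: c :: rest)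
      = (if c = '&' then ['&']
         else if c = '\\' then ['\\', '\\']
         else if c = 'n' then ['\n']
         else ['\\', c]) ++ pvGoA rest := by
  simp [pvGoA]

theorem goA_other (c : Char) (rest : List Char) (h : c ≠ '\\') :
    pvGoA (c :: rest) = (if c = '&' then ['\\', 'g', '<', '0', '>'] else [c]) ++ pvGoA rest := by
  cases rest with
  | nil => simp [pvGoA, h]
  | cons d r => simp [pvGoA, h]

theorem repl_esc_default {c : Char} (h1 : c ≠ '&') (h2 : c ≠ '\\') (h3 : c ≠ 'n') :
    pvRepl (.esc c) = ['\\', c] := by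
  unfold pvRepl; split <;> simp_all

theorem subB_eq_goA : ∀ (n : ℕ) (l : List Char), l.length ≤ n → pvSubB l = pvGoA l := by
  intro n
  induction n with
  | zero =>
    intro l hl
    have : l = [] := by cases l <;> simp_all
    subst this
    rw [subB_none ft_nil]; simp [pvGoA]
  | succ n ih =>
    intro l hl
    cases l with
    | nil => rw [subB_none ft_nil]; simp [pvGoA]
    | cons c rest =>
      by_cases h1 : c = '\\'
      · subst h1
        cases rest with
        | nil => rw [subB_none ft_bs_nil]; simp [pvGoA]
        | cons c2 rest2 =>
          by_cases hn : c2 = '\n'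
          · subst hn
            rw [subB_prepend _ _ (ft_bs_nl rest2),
                subB_prepend _ _ (ft_skip rest2 (by decide) (by decide)),
                ih rest2 (by simp at hl; omega), goA_bs_cons]
            simp
          · rw [subB_some (ft_esc rest2 hn), ih rest2 (by simp at hl; omega), goA_bs_cons]
            by_cases ha : c2 = '&'
            · subst ha; simp [pvRepl]
            · by_cases hb : c2 = '\\'
              · subst hb; simp [pvRepl]
              · by_cases hc : c2 = 'n'
                · subst hc; simp [pvRepl]
                · rw [repl_esc_default ha hb hc]; simp [ha, hb, hc]
      · by_cases h2 : c = '&'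
        · subst h2
          rw [subB_some (ft_amp rest), ih rest (by simp at hl; omega), goA_other _ _ h1]
          simp [pvRepl]
        · rw [subB_prepend _ _ (ft_skip rest h1 h2), ih rest (by simp at hl; omega),
              goA_other _ _ h1]
          simp [h2]

-- ===== VERDICT (by name: the statement is the Claim_ definition above) =====
theorem bre_to_python_replacement_py_spec : Claim_equal_bre_to_python_replacement_py := by
  intro s _
  unfold Spec_bre_to_python_replacement_py bre_to_python_replacement_py bre_to_python_replacement_py_alt
  rw [subB_eq_goA s.toList.length s.toList le_rfl]
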